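-- pv_equiv track=rewrite | github.com/niinasaarelainen/omat-python-projektit2020 | CodeAcademy_recursion2021/matriisin_lapikaynti.py | alueiden_lkm
-- ===== SOURCE A (Python) =====
-- def alueiden_lkm(input_list):
--     if input_list == []:
--         return 1
--
--     head = input_list[0]
--     smaller_list = input_list[1:]
--     if head == -1:
--         return 1 + alueiden_lkm(smaller_list)
--
--     return alueiden_lkm(smaller_list)
-- ===== SOURCE B (Python) =====
-- def alueiden_lkm(input_list):
--     count = 1
--     for element in input_list:
--         if element == -1:
--             count += 1
--     return count
-- ===== Notes on version B (the rewrite author's own statement) =====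
-- stated objective: simpler
-- what changed: Replaces the head/tail structural recursion with a single iterative pass keeping an accumulator initialised to 1.
import Mathlib
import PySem

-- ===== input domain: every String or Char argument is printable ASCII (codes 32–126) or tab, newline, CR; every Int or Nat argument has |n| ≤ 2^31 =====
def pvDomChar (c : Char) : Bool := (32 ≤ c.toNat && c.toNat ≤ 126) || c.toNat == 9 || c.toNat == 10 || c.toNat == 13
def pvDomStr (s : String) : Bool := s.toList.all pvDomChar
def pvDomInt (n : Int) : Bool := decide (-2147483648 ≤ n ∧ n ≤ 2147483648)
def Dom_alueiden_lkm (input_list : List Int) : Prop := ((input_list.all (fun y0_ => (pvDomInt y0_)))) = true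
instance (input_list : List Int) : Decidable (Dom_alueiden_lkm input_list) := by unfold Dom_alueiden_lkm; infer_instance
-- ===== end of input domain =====

-- B replaces the head/tail recursion by a single iterative pass with an accumulator (simpler).


-- ===== PORT A =====
def alueiden_lkm (input_list : List Int) : Int :=
  match input_list with
  | [] => 1
  | head :: smaller_list =>
    if head = -1 then 1 + alueiden_lkm smaller_list
    else alueiden_lkm smaller_list

-- ===== PORT B =====
def alueiden_lkm_alt (input_list : List Int) : Int :=
  input_list.foldl (fun count element => if element = -1 then count + 1 else count) 1

-- ===== PRECONDITION & SPEC =====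
def Spec_alueiden_lkm (input_list : List Int) (out : Int) : Prop := out = alueiden_lkm_alt input_list
instance (input_list : List Int) (out : Int) : Decidable (Spec_alueiden_lkm input_list out) := by unfold Spec_alueiden_lkm; infer_instance

-- ===== CLAIM (what is proved, stated in full; the proofs are below) =====
def Claim_equal_alueiden_lkm : Prop := ∀ (input_list : List Int), Dom_alueiden_lkm input_list → Spec_alueiden_lkm input_list (alueiden_lkm input_list)

-- ===== LEMMAS AND PROOFS =====

-- ===== VERDICT (by name: the statement is the Claim_ definition above) =====
theorem foldl_count (l : List Int) (c : Int) :
    l.foldl (fun count element => if element = -1 then count + 1 else count) c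
      = c + alueiden_lkm l - 1 := by
  induction l generalizing c with
  | nil => simp [alueiden_lkm]
  | cons h t ih =>
    simp only [List.foldl_cons, alueiden_lkm]
    split_ifs with hh <;> rw [ih] <;> ring

theorem alueiden_lkm_spec : Claim_equal_alueiden_lkm := by
  intro l _
  unfold Spec_alueiden_lkm alueiden_lkm_alt
  rw [foldl_count]; ring
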